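-- pv_equiv track=rewrite | github.com/sengami-yuka/py | coding_problems/leetcode/2049_count_nodes_with_the_highest_score.py | countHighestScoreNodes
-- ===== SOURCE A (Python) =====
-- from typing import List
--
-- class TreeNode:
--     def __init__(self, val=0, left=None, right=None):
--         self.val = val
--         self.children = []
--
-- def countHighestScoreNodes(parents: List[int]) -> int:
--     def dfs(node):
--         if not node:
--             return 0
--         for c in node.children:
--             node.val += dfs(c)
--         return node.val
--
--     L = len(parents)
--     bt = [TreeNode(1) for _ in range(L)]
--     for i in range(1, L):
--         p = parents[i]
--         bt[p].children.append(bt[i])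
--     dfs(bt[0])
--
--     h = 0
--     c = 0
--     for i in range(L):
--         if bt[i].val == 1:
--             s = L - 1
--         else:
--             s = (L - bt[i].val) or 1
--             for child in bt[i].children:
--                 s *= child.val
--         if s > h:
--             h = s
--             c = 1
--         elif s == h:
--             c += 1
--     return c
-- ===== SOURCE B (Python) =====
-- from typing import List
--
-- def countHighestScoreNodes(parents: List[int]) -> int:
--     L = len(parents)
--     kids = [[] for _ in range(L)]
--     for i in range(1, L):
--         kids[parents[i]].append(i)
--     # iterative top-down traversal from the root (no recursion):
--     # a worklist visited left to right; children are appended after their parent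
--     order = [0]
--     idx = 0
--     while idx < len(order):
--         order.extend(kids[order[idx]])
--         idx += 1
--     # children precede their parent in reversed order, so sizes are final when read
--     size = [1] * L
--     for n in reversed(order):
--         for c in kids[n]:
--             size[n] += size[c]
--     best = 0
--     cnt = 0
--     for i in range(L):
--         s = 1
--         for c in kids[i]:
--             s *= size[c]
--         up = L - size[i]
--         if up > 0:
--             s *= up
--         if s > best:
--             best = s
--             cnt = 1
--         elif s == best:
--             cnt += 1
--     return cnt
-- ===== Notes on version B (the rewrite author's own statement) =====
-- stated objective: idiomatic
-- what changed: Replaces the recursive DFS over mutated TreeNode objects and the leaf special-case in scoring by an iterative worklist traversal from the root that fills a flat size array (children are resolved in reverse visit order) and a unified scoring formula: product of child sizes times the upward remainder when positive. Pre_ admits exactly the inputs on which A returns (nonempty list, every non-root parent a valid, possibly negative, Python index); outside it A raises IndexError.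
import Mathlib
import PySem

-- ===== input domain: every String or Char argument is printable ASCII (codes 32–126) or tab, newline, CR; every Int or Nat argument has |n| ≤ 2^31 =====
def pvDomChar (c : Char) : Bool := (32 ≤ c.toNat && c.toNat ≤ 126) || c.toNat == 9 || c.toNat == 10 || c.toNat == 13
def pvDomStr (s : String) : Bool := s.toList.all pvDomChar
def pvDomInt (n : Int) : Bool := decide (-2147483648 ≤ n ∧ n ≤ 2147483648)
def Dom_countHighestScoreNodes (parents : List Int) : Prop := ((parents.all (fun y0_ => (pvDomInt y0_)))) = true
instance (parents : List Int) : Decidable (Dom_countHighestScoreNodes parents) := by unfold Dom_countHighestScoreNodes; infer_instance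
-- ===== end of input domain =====

-- B replaces A's recursive DFS over mutated TreeNode objects (and its leaf special case in
-- scoring) by an iterative worklist traversal filling a flat size array, with a unified scoring
-- formula; equivalence is proved on every input on which A returns (Pre_).

-- ===== PORT A =====
-- Python's negative list index wraps by adding the length (exact for -len ≤ p < 0; an
-- out-of-range p raises IndexError in Python and such inputs are excluded by Pre_).
def pvIdxWrap (L : Nat) (p : Int) : Nat := if p < 0 then (p + L).toNat else p.toNat

-- `for i in range(1, L): bt[p].children.append(bt[i])` — node identity is its index.
def pvBuildChA (parents : List Int) : List (List Nat) :=
  (List.range' 1 (parents.length - 1)).foldl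
    (fun ch i =>
      let j := pvIdxWrap parents.length (parents.getD i 0)
      ch.set j (ch.getD j [] ++ [i]))
    (List.replicate parents.length [])

-- recursive `dfs` threading the array of node vals; fuel bounds the recursion depth
-- (fuel L+1 is enough on every input Pre_ admits; Python has no fuel and recurses).
mutual
def pvDfsA (ch : List (List Nat)) : Nat → Nat → List Int → List Int
  | 0, _, v => v
  | f+1, i, v => pvDfsKids ch f i (ch.getD i []) v
  termination_by f _ _ => (f, 0)
def pvDfsKids (ch : List (List Nat)) : Nat → Nat → List Nat → List Int → List Int
  | _, _, [], v => v
  | f, i, c :: cs, v =>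
      let v' := pvDfsA ch f c v
      pvDfsKids ch f i cs (v'.set i (v'.getD i 0 + v'.getD c 0))
  termination_by f _ cs _ => (f, cs.length + 1)
end

def countHighestScoreNodes (parents : List Int) : Int :=
  let L := parents.length
  let ch := pvBuildChA parents
  let val := pvDfsA ch (L + 1) 0 (List.replicate L 1)
  ((List.range L).foldl
    (fun (hc : Int × Int) i =>
      let s :=
        if val.getD i 0 = 1 then (L : Int) - 1
        else
          let t := (L : Int) - val.getD i 0
          (ch.getD i []).foldl (fun s c => s * val.getD c 0) (if t = 0 then 1 else t)
      if s > hc.1 then (s, 1) else if s = hc.1 then (hc.1, hc.2 + 1) else hc)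
    (0, 0)).2

-- ===== PORT B =====
-- `for i in range(1, L): kids[parents[i]].append(i)`
def pvBuildChB (parents : List Int) : List (List Nat) :=
  (List.range' 1 (parents.length - 1)).foldl
    (fun ch i =>
      let j := pvIdxWrap parents.length (parents.getD i 0)
      ch.set j (ch.getD j [] ++ [i]))
    (List.replicate parents.length [])

-- `while idx < len(order): order.extend(kids[order[idx]]); idx += 1` — the worklist grows by at
-- most one entry per node, so fuel = len(parents) covers every input Pre_ admits (Python has no fuel).
def pvBfs (kids : List (List Nat)) : Nat → List Nat → Nat → List Nat
  | 0, order, _ => order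
  | f+1, order, idx =>
      if idx < order.length then
        pvBfs kids f (order ++ kids.getD (order.getD idx 0) []) (idx + 1)
      else order

-- `for n in reversed(order): for c in kids[n]: size[n] += size[c]`
def pvSizesB (parents : List Int) (kids : List (List Nat)) (order : List Nat) : List Int :=
  order.reverse.foldl
    (fun sz n => (kids.getD n []).foldl
      (fun sz c => sz.set n (sz.getD n 0 + sz.getD c 0)) sz)
    (List.replicate parents.length 1)

def countHighestScoreNodes_alt (parents : List Int) : Int :=
  let L := parents.length
  let kids := pvBuildChB parents
  let order := pvBfs kids L [0] 0
  let size := pvSizesB parents kids order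
  ((List.range L).foldl
    (fun (bc : Int × Int) i =>
      let s := (kids.getD i []).foldl (fun s c => s * size.getD c 0) 1
      let up := (L : Int) - size.getD i 0
      let s := if up > 0 then s * up else s
      if s > bc.1 then (s, 1) else if s = bc.1 then (bc.1, bc.2 + 1) else bc)
    (0, 0)).2

-- ===== PRECONDITION & SPEC =====
-- Pre_ = exactly the inputs on which the Python A returns: a nonempty list whose non-root entries
-- are valid (possibly negative) Python indices into it; on any other input A raises IndexError.
def Pre_countHighestScoreNodes (parents : List Int) : Prop :=
  parents ≠ [] ∧
  (∀ i, i < parents.length → 1 ≤ i →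
      -(parents.length : Int) ≤ parents.getD i 0 ∧ parents.getD i 0 < (parents.length : Int))

instance (parents : List Int) : Decidable (Pre_countHighestScoreNodes parents) := by
  unfold Pre_countHighestScoreNodes; infer_instance

def pvWitness_countHighestScoreNodes : List Int := [-1, 0, 0, 2]

def Spec_countHighestScoreNodes (parents : List Int) (out : Int) : Prop := out = countHighestScoreNodes_alt parents
instance (parents : List Int) (out : Int) : Decidable (Spec_countHighestScoreNodes parents out) := by unfold Spec_countHighestScoreNodes; infer_instance

-- ===== CLAIM (what is proved, stated in full; the proofs are below) =====
def Claim_equal_countHighestScoreNodes : Prop := ∀ (parents : List Int), Dom_countHighestScoreNodes parents → Pre_countHighestScoreNodes parents → Spec_countHighestScoreNodes parents (countHighestScoreNodes parents)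

-- ===== LEMMAS AND PROOFS =====

-- parent step as a function on node indices (Python's negative-index wrap; root 0 is a fixed point)
def pvPa (parents : List Int) (n : Nat) : Nat :=
  if n = 0 then 0 else pvIdxWrap parents.length (parents.getD n 0)

-- depth of a node (length of its parent chain down to the root), with fuel
def pvDptF (parents : List Int) : Nat → Nat → Nat
  | 0, _ => 0
  | f+1, n => if n = 0 then 0 else pvDptF parents f (pvPa parents n) + 1

def pvDpt (parents : List Int) (n : Nat) : Nat := pvDptF parents parents.length n

-- i is an ancestor of j (including j itself)
def pvAnc (parents : List Int) (i j : Nat) : Bool :=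
  (List.range (parents.length + 1)).any (fun k => (pvPa parents)^[k] j == i)

-- the subtree of i, as the list of its descendants
def pvSub (parents : List Int) (i : Nat) : List Nat :=
  (List.range parents.length).filter (fun j => pvAnc parents i j)

def pvSz (parents : List Int) (i : Nat) : Nat := (pvSub parents i).length

def pvKids (parents : List Int) (i : Nat) : List Nat :=
  (List.range' 1 (parents.length - 1)).filter (fun c => pvPa parents c == i)

-- `pvReach parents n` = the parent chain of n reaches the root
abbrev pvReach (parents : List Int) (n : Nat) : Prop :=
  (pvPa parents)^[parents.length] n = 0

-- ---------- getD/set helpers ----------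
theorem pv_getD_set_self' {α : Type} (l : List α) (i : Nat) (a d : α) (h : i < l.length) :
    (l.set i a).getD i d = a := by
  simp [List.getD_eq_getElem?_getD, List.getElem?_set_self h]

theorem pv_getD_set_ne' {α : Type} (l : List α) (i j : Nat) (a d : α) (h : i ≠ j) :
    (l.set i a).getD j d = l.getD j d := by
  simp [List.getD_eq_getElem?_getD, List.getElem?_set_ne h]

theorem pv_getD_append {α : Type} (l l' : List α) (i : Nat) (d : α) (h : i < l.length) :
    (l ++ l').getD i d = l.getD i d := by
  simp [List.getD_eq_getElem?_getD, List.getElem?_append_left h]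

-- ---------- basic validity facts ----------
theorem pv_len_pos (parents : List Int) (hP : Pre_countHighestScoreNodes parents) :
    1 ≤ parents.length := by
  rcases hP with ⟨h, -⟩
  cases parents with
  | nil => exact absurd rfl h
  | cons a l => simp

theorem pv_pa_lt (parents : List Int) (hP : Pre_countHighestScoreNodes parents)
    (n : Nat) (hn : n < parents.length) : pvPa parents n < parents.length := by
  have hL := pv_len_pos parents hP
  by_cases h0 : n = 0
  · simpa [pvPa, h0] using hL
  · have hB := hP.2 n hn (by omega)
    simp only [pvPa, h0, if_false, pvIdxWrap]
    split <;> omega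

theorem pv_pa_zero (parents : List Int) : pvPa parents 0 = 0 := by simp [pvPa]

theorem pv_iter_zero_stable (parents : List Int) (n k k' : Nat)
    (h : (pvPa parents)^[k] n = 0) (hk : k ≤ k') : (pvPa parents)^[k'] n = 0 := by
  obtain ⟨d, rfl⟩ : ∃ d, k' = d + k := ⟨k' - k, by omega⟩
  rw [Function.iterate_add_apply, h]
  induction d with
  | zero => simp
  | succ d ih => rw [Function.iterate_succ_apply, pv_pa_zero]; exact ih (by omega)

theorem pv_iter_lt (parents : List Int) (hP : Pre_countHighestScoreNodes parents)
    (n : Nat) (hn : n < parents.length) (k : Nat) :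
    (pvPa parents)^[k] n < parents.length := by
  induction k generalizing n with
  | zero => simpa
  | succ k ih =>
    rw [Function.iterate_succ_apply]
    exact ih _ (pv_pa_lt parents hP n hn)

theorem pv_reach_pa (parents : List Int) (n : Nat) (hr : pvReach parents n) :
    pvReach parents (pvPa parents n) := by
  unfold pvReach at *
  rw [← Function.iterate_succ_apply, Function.iterate_succ_apply', hr, pv_pa_zero]

theorem pv_reach_zero (parents : List Int) : pvReach parents 0 :=
  pv_iter_zero_stable parents 0 0 parents.length rfl (by omega)

-- any node whose chain ever reaches the root does so within L steps
theorem pv_reach_bound (parents : List Int) (hP : Pre_countHighestScoreNodes parents)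
    (j : Nat) (hj : j < parents.length) (hex : ∃ k, (pvPa parents)^[k] j = 0) :
    pvReach parents j := by
  classical
  let m := Nat.find hex
  have hm : (pvPa parents)^[m] j = 0 := Nat.find_spec hex
  have hmmin : ∀ k, k < m → (pvPa parents)^[k] j ≠ 0 := fun k hk => Nat.find_min hex hk
  have hinj : ((List.range (m + 1)).map (fun k => (pvPa parents)^[k] j)).Nodup := by
    refine (List.nodup_map_iff_inj_on List.nodup_range).mpr ?_
    intro a ha b hb hab
    simp only [List.mem_range] at ha hb
    by_contra hne
    rcases Nat.lt_or_ge a b with h | h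
    · exact hmmin (m - (b - a)) (by omega) (by
        have : (pvPa parents)^[m - (b - a)] j
            = (pvPa parents)^[m - b] ((pvPa parents)^[a] j) := by
          rw [← Function.iterate_add_apply]
          congr 1
          omega
        rw [this, hab, ← Function.iterate_add_apply, show m - b + b = m by omega, hm])
    · rcases Nat.lt_or_ge b a with h2 | h2
      · exact hmmin (m - (a - b)) (by omega) (by
          have : (pvPa parents)^[m - (a - b)] j
              = (pvPa parents)^[m - a] ((pvPa parents)^[b] j) := by
            rw [← Function.iterate_add_apply]
            congr 1
            omega
          rw [this, ← hab, ← Function.iterate_add_apply, show m - a + a = m by omega, hm])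
      · omega
  have hsub : ((List.range (m + 1)).map (fun k => (pvPa parents)^[k] j))
      ⊆ List.range parents.length := by
    intro x hx
    simp only [List.mem_map] at hx
    obtain ⟨k, -, rfl⟩ := hx
    simpa [List.mem_range] using pv_iter_lt parents hP j hj k
  have hle := (List.subperm_of_subset hinj hsub).length_le
  simp at hle
  exact pv_iter_zero_stable parents j m parents.length hm (by omega)

theorem pv_reach_of_pa (parents : List Int) (hP : Pre_countHighestScoreNodes parents)
    (c : Nat) (hc : c < parents.length) (hr : pvReach parents (pvPa parents c)) :
    pvReach parents c := by
  refine pv_reach_bound parents hP c hc ⟨parents.length + 1, ?_⟩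
  rw [Function.iterate_succ_apply]
  exact hr

-- ---------- depth ----------
theorem pv_dptF_le (parents : List Int) (f n : Nat) : pvDptF parents f n ≤ f := by
  induction f generalizing n with
  | zero => simp [pvDptF]
  | succ f ih =>
    unfold pvDptF
    split
    · omega
    · exact Nat.succ_le_succ (ih _)

theorem pv_dptF_zero (parents : List Int) (f : Nat) : pvDptF parents f 0 = 0 := by
  cases f <;> simp [pvDptF]

theorem pv_dptF_stable (parents : List Int) (f : Nat) :
    ∀ n g, (pvPa parents)^[f] n = 0 → f ≤ g → pvDptF parents g n = pvDptF parents f n := by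
  induction f with
  | zero =>
    intro n g hc hg
    simp only [Function.iterate_zero, id] at hc
    simp [hc, pv_dptF_zero]
  | succ f ih =>
    intro n g hc hg
    by_cases h0 : n = 0
    · simp [h0, pv_dptF_zero]
    · obtain ⟨g', rfl⟩ : ∃ g', g = g' + 1 := ⟨g - 1, by omega⟩
      rw [Function.iterate_succ_apply] at hc
      simp only [pvDptF, h0, if_false]
      rw [ih _ g' hc (by omega)]

theorem pv_dpt_zero (parents : List Int) : pvDpt parents 0 = 0 := pv_dptF_zero _ _

theorem pv_dpt_le (parents : List Int) (n : Nat) : pvDpt parents n ≤ parents.length :=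
  pv_dptF_le _ _ _

theorem pv_dpt_step (parents : List Int) (hP : Pre_countHighestScoreNodes parents)
    (n : Nat) (hr : pvReach parents n) (h0 : n ≠ 0) :
    pvDpt parents n = pvDpt parents (pvPa parents n) + 1 := by
  have hL := pv_len_pos parents hP
  obtain ⟨L', hL'⟩ : ∃ L', parents.length = L' + 1 := ⟨parents.length - 1, by omega⟩
  have hc : (pvPa parents)^[L'] (pvPa parents n) = 0 := by
    have := hr
    unfold pvReach at this
    rw [hL', Function.iterate_succ_apply] at this
    exact this
  have h1 : pvDptF parents (L' + 1) n
      = if n = 0 then 0 else pvDptF parents L' (pvPa parents n) + 1 := rfl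
  unfold pvDpt
  rw [hL', h1, if_neg h0,
    pv_dptF_stable parents L' (pvPa parents n) (L' + 1) hc (by omega)]

theorem pv_dpt_iter (parents : List Int) (hP : Pre_countHighestScoreNodes parents)
    (n : Nat) (hr : pvReach parents n) :
    ∀ k, k ≤ pvDpt parents n → pvDpt parents ((pvPa parents)^[k] n) = pvDpt parents n - k := by
  intro k
  induction k generalizing n with
  | zero => simp
  | succ k ih =>
    intro hk
    have h0 : n ≠ 0 := by
      intro h; rw [h, pv_dpt_zero] at hk; omega
    have hstep := pv_dpt_step parents hP n hr h0
    rw [Function.iterate_succ_apply]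
    rw [ih (pvPa parents n) (pv_reach_pa parents n hr) (by omega)]
    omega

theorem pv_iter_dpt_zero (parents : List Int) (hP : Pre_countHighestScoreNodes parents)
    (n : Nat) (hr : pvReach parents n) :
    (pvPa parents)^[pvDpt parents n] n = 0 := by
  generalize hd : pvDpt parents n = d
  induction d generalizing n with
  | zero =>
    by_cases h0 : n = 0
    · simp [h0]
    · have := pv_dpt_step parents hP n hr h0; omega
  | succ d ih =>
    have h0 : n ≠ 0 := by
      intro h; rw [h, pv_dpt_zero] at hd; omega
    have hstep := pv_dpt_step parents hP n hr h0
    rw [Function.iterate_succ_apply]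
    exact ih (pvPa parents n) (pv_reach_pa parents n hr) (by omega)

theorem pv_chain_nodup (parents : List Int) (hP : Pre_countHighestScoreNodes parents)
    (n : Nat) (hr : pvReach parents n) :
    ((List.range (pvDpt parents n + 1)).map (fun k => (pvPa parents)^[k] n)).Nodup := by
  refine (List.nodup_map_iff_inj_on List.nodup_range).mpr ?_
  intro x hx y hy hxy
  simp only [List.mem_range] at hx hy
  have dx := pv_dpt_iter parents hP n hr x (by omega)
  have dy := pv_dpt_iter parents hP n hr y (by omega)
  rw [hxy, dy] at dx
  omega

theorem pv_dpt_lt (parents : List Int) (hP : Pre_countHighestScoreNodes parents)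
    (n : Nat) (hn : n < parents.length) (hr : pvReach parents n) :
    pvDpt parents n < parents.length := by
  have h2 : ((List.range (pvDpt parents n + 1)).map (fun k => (pvPa parents)^[k] n))
      ⊆ List.range parents.length := by
    intro x hx
    simp only [List.mem_map] at hx
    obtain ⟨k, -, rfl⟩ := hx
    simpa [List.mem_range] using pv_iter_lt parents hP n hn k
  have h3 := (List.subperm_of_subset (pv_chain_nodup parents hP n hr) h2).length_le
  simp at h3
  omega

-- ---------- ancestors and subtrees ----------
theorem pv_anc_iff (parents : List Int) (hP : Pre_countHighestScoreNodes parents)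
    (i j : Nat) (hr : pvReach parents j) :
    pvAnc parents i j = true ↔ ∃ k, k ≤ pvDpt parents j ∧ (pvPa parents)^[k] j = i := by
  unfold pvAnc
  simp only [List.any_eq_true, List.mem_range, beq_iff_eq]
  constructor
  · rintro ⟨k, hk, rfl⟩
    by_cases hkd : k ≤ pvDpt parents j
    · exact ⟨k, hkd, rfl⟩
    · refine ⟨pvDpt parents j, le_refl _, ?_⟩
      have h0 := pv_iter_dpt_zero parents hP j hr
      rw [h0, pv_iter_zero_stable parents j (pvDpt parents j) k h0 (by omega)]
  · rintro ⟨k, hk, rfl⟩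
    exact ⟨k, by have := pv_dpt_le parents j; omega, rfl⟩

theorem pv_mem_sub (parents : List Int) (i j : Nat) :
    j ∈ pvSub parents i ↔ j < parents.length ∧ pvAnc parents i j = true := by
  simp [pvSub, List.mem_filter, List.mem_range]

theorem pv_sub_self (parents : List Int) (i : Nat) (hi : i < parents.length) :
    i ∈ pvSub parents i := by
  rw [pv_mem_sub]
  refine ⟨hi, ?_⟩
  unfold pvAnc
  simp only [List.any_eq_true, List.mem_range, beq_iff_eq]
  exact ⟨0, by omega, rfl⟩

theorem pv_sub_nodup (parents : List Int) (i : Nat) : (pvSub parents i).Nodup :=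
  List.Nodup.filter _ List.nodup_range

theorem pv_sz_pos (parents : List Int) (i : Nat) (hi : i < parents.length) :
    1 ≤ pvSz parents i :=
  List.length_pos_of_mem (pv_sub_self parents i hi)

theorem pv_sz_le (parents : List Int) (i : Nat) : pvSz parents i ≤ parents.length := by
  have := List.length_filter_le (fun j => pvAnc parents i j) (List.range parents.length)
  simpa [pvSz, pvSub] using this

theorem pv_mem_kids (parents : List Int) (hP : Pre_countHighestScoreNodes parents)
    (i c : Nat) :
    c ∈ pvKids parents i ↔ 1 ≤ c ∧ c < parents.length ∧ pvPa parents c = i := by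
  have hL := pv_len_pos parents hP
  simp only [pvKids, List.mem_filter, List.mem_range'_1, beq_iff_eq]
  omega

theorem pv_kids_nodup (parents : List Int) (i : Nat) : (pvKids parents i).Nodup :=
  List.Nodup.filter _ (List.nodup_range' ..)

theorem pv_reach_kid (parents : List Int) (hP : Pre_countHighestScoreNodes parents)
    (i c : Nat) (hc : c ∈ pvKids parents i) (hri : pvReach parents i) :
    pvReach parents c := by
  rw [pv_mem_kids parents hP] at hc
  exact pv_reach_of_pa parents hP c hc.2.1 (hc.2.2 ▸ hri)

theorem pv_unreach_kid (parents : List Int) (hP : Pre_countHighestScoreNodes parents)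
    (i c : Nat) (hc : c ∈ pvKids parents i) (hri : ¬ pvReach parents i) :
    ¬ pvReach parents c := by
  intro hrc
  apply hri
  have := pv_reach_pa parents c hrc
  rwa [((pv_mem_kids parents hP i c).mp hc).2.2] at this

theorem pv_dpt_kid (parents : List Int) (hP : Pre_countHighestScoreNodes parents)
    (i c : Nat) (hc : c ∈ pvKids parents i) (hri : pvReach parents i) :
    pvDpt parents c = pvDpt parents i + 1 := by
  have hrc := pv_reach_kid parents hP i c hc hri
  rw [pv_mem_kids parents hP] at hc
  have := pv_dpt_step parents hP c hrc (by omega)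
  rw [hc.2.2] at this
  exact this

theorem pv_reach_of_sub (parents : List Int) (hP : Pre_countHighestScoreNodes parents)
    (c j : Nat) (hj : j < parents.length) (hrc : pvReach parents c)
    (hmem : j ∈ pvSub parents c) : pvReach parents j := by
  rw [pv_mem_sub] at hmem
  unfold pvAnc at hmem
  obtain ⟨-, h⟩ := hmem
  simp only [List.any_eq_true, List.mem_range, beq_iff_eq] at h
  obtain ⟨k, -, hk⟩ := h
  refine pv_reach_bound parents hP j hj ⟨k + parents.length, ?_⟩
  rw [Nat.add_comm, Function.iterate_add_apply, hk]
  exact hrc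

-- membership in a child subtree, characterised through depths
theorem pv_mem_sub_dpt (parents : List Int) (hP : Pre_countHighestScoreNodes parents)
    (c j : Nat) (hrj : pvReach parents j) (hmem : j ∈ pvSub parents c) :
    pvDpt parents c ≤ pvDpt parents j ∧
      (pvPa parents)^[pvDpt parents j - pvDpt parents c] j = c := by
  rw [pv_mem_sub] at hmem
  rw [pv_anc_iff parents hP _ _ hrj] at hmem
  obtain ⟨-, k, hk, rfl⟩ := hmem
  have := pv_dpt_iter parents hP j hrj k hk
  constructor
  · omega
  · rw [this]
    congr 1
    omega

theorem pv_sub_disjoint (parents : List Int) (hP : Pre_countHighestScoreNodes parents)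
    (i c c' : Nat) (hri : pvReach parents i)
    (hc : c ∈ pvKids parents i) (hc' : c' ∈ pvKids parents i)
    (hne : c ≠ c') (j : Nat) (hjc : j ∈ pvSub parents c) : j ∉ pvSub parents c' := by
  intro hjc'
  have hj : j < parents.length := ((pv_mem_sub parents c j).mp hjc).1
  have hrj : pvReach parents j :=
    pv_reach_of_sub parents hP c j hj (pv_reach_kid parents hP i c hc hri) hjc
  have h1 := pv_mem_sub_dpt parents hP c j hrj hjc
  have h2 := pv_mem_sub_dpt parents hP c' j hrj hjc'
  have e1 := pv_dpt_kid parents hP i c hc hri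
  have e2 := pv_dpt_kid parents hP i c' hc' hri
  apply hne
  have : pvDpt parents j - pvDpt parents c = pvDpt parents j - pvDpt parents c' := by omega
  rw [← h1.2, ← h2.2, this]

theorem pv_not_mem_kid_sub (parents : List Int) (hP : Pre_countHighestScoreNodes parents)
    (i c : Nat) (hri : pvReach parents i) (hc : c ∈ pvKids parents i) :
    i ∉ pvSub parents c := by
  intro hmem
  have h1 := pv_mem_sub_dpt parents hP c i hri hmem
  have e1 := pv_dpt_kid parents hP i c hc hri
  have h3 := h1.1
  omega

theorem pv_sub_kid_subset (parents : List Int) (hP : Pre_countHighestScoreNodes parents)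
    (i c j : Nat) (hri : pvReach parents i) (hc : c ∈ pvKids parents i)
    (hj : j ∈ pvSub parents c) : j ∈ pvSub parents i ∧ j ≠ i := by
  have hjL : j < parents.length := ((pv_mem_sub parents c j).mp hj).1
  have hrj : pvReach parents j :=
    pv_reach_of_sub parents hP c j hjL (pv_reach_kid parents hP i c hc hri) hj
  have h1 := pv_mem_sub_dpt parents hP c j hrj hj
  have e1 := pv_dpt_kid parents hP i c hc hri
  have hpc : pvPa parents c = i := ((pv_mem_kids parents hP i c).mp hc).2.2
  refine ⟨?_, ?_⟩
  · rw [pv_mem_sub, pv_anc_iff parents hP _ _ hrj]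
    refine ⟨hjL, pvDpt parents j - pvDpt parents c + 1, by omega, ?_⟩
    rw [Function.iterate_succ_apply', h1.2, hpc]
  · intro h
    rw [h] at hj
    exact pv_not_mem_kid_sub parents hP i c hri hc hj

theorem pv_sub_split (parents : List Int) (hP : Pre_countHighestScoreNodes parents)
    (i j : Nat) (hri : pvReach parents i) (hi : i < parents.length)
    (hj : j ∈ pvSub parents i) (hne : j ≠ i) :
    ∃ c ∈ pvKids parents i, j ∈ pvSub parents c := by
  have hjL : j < parents.length := ((pv_mem_sub parents i j).mp hj).1
  have hrj : pvReach parents j := pv_reach_of_sub parents hP i j hjL hri hj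
  have hex : ∃ k, (pvPa parents)^[k] j = i := by
    have := ((pv_mem_sub parents i j).mp hj).2
    rw [pv_anc_iff parents hP _ _ hrj] at this
    obtain ⟨k, -, hk⟩ := this
    exact ⟨k, hk⟩
  classical
  let k0 := Nat.find hex
  have hk0 : (pvPa parents)^[k0] j = i := Nat.find_spec hex
  have hk0min : ∀ m, m < k0 → (pvPa parents)^[m] j ≠ i := fun m hm => Nat.find_min hex hm
  have hk0pos : 1 ≤ k0 := by
    rcases Nat.eq_zero_or_pos k0 with h | h
    · exfalso; apply hne; rw [← hk0, h]; simp
    · exact h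
  set c := (pvPa parents)^[k0 - 1] j with hcdef
  have hcL : c < parents.length := pv_iter_lt parents hP j hjL _
  have hpc : pvPa parents c = i := by
    have hs : pvPa parents ((pvPa parents)^[k0 - 1] j) = (pvPa parents)^[k0 - 1 + 1] j :=
      (Function.iterate_succ_apply' _ _ _).symm
    rw [hcdef, hs, show k0 - 1 + 1 = k0 by omega, hk0]
  have hc0 : c ≠ 0 := by
    intro h
    apply hk0min (k0 - 1) (by omega)
    rw [← hcdef] at *
    rw [h] at hpc
    rw [pv_pa_zero] at hpc
    rw [h, ← hpc]
  have hkd : k0 ≤ pvDpt parents j := by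
    by_contra hgt
    have h0 := pv_iter_dpt_zero parents hP j hrj
    have hz : (pvPa parents)^[k0] j = 0 :=
      pv_iter_zero_stable parents j _ k0 h0 (by omega)
    have hi0 : i = 0 := by rw [← hk0, hz]
    exact hk0min (pvDpt parents j) (by omega) (by rw [h0, hi0])
  refine ⟨c, (pv_mem_kids parents hP i c).mpr ⟨by omega, hcL, hpc⟩, ?_⟩
  rw [pv_mem_sub, pv_anc_iff parents hP _ _ hrj]
  exact ⟨hjL, k0 - 1, by omega, rfl⟩

theorem pv_flat_nodup (parents : List Int) (hP : Pre_countHighestScoreNodes parents)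
    (i : Nat) (hri : pvReach parents i)
    (cs : List Nat) (hnd : cs.Nodup) (hcs : ∀ c ∈ cs, c ∈ pvKids parents i) :
    (cs.flatMap (pvSub parents)).Nodup := by
  induction cs with
  | nil => simp
  | cons c cs ih =>
    rw [List.flatMap_cons]
    refine List.Nodup.append (pv_sub_nodup parents c)
      (ih (List.Nodup.of_cons hnd) (fun c' hc' => hcs c' (by simp [hc']))) ?_
    intro j hjc hjf
    rw [List.mem_flatMap] at hjf
    obtain ⟨c', hc', hjc'⟩ := hjf
    have hne : c ≠ c' := by
      rintro rfl
      exact (List.nodup_cons.mp hnd).1 hc'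
    exact pv_sub_disjoint parents hP i c c' hri
      (hcs c (by simp)) (hcs c' (by simp [hc'])) hne j hjc hjc'

theorem pv_sub_perm (parents : List Int) (hP : Pre_countHighestScoreNodes parents)
    (i : Nat) (hri : pvReach parents i) (hi : i < parents.length) :
    (pvSub parents i).Perm (i :: (pvKids parents i).flatMap (pvSub parents)) := by
  have hndR : (i :: (pvKids parents i).flatMap (pvSub parents)).Nodup := by
    rw [List.nodup_cons]
    refine ⟨?_, pv_flat_nodup parents hP i hri _ (pv_kids_nodup parents i) (fun c h => h)⟩
    intro hmem
    rw [List.mem_flatMap] at hmem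
    obtain ⟨c, hc, hic⟩ := hmem
    exact (pv_sub_kid_subset parents hP i c i hri hc hic).2 rfl
  rw [List.perm_ext_iff_of_nodup (pv_sub_nodup parents i) hndR]
  intro a
  simp only [List.mem_cons, List.mem_flatMap]
  constructor
  · intro ha
    by_cases hai : a = i
    · exact Or.inl hai
    · exact Or.inr (pv_sub_split parents hP i a hri hi ha hai)
  · rintro (rfl | ⟨c, hc, hac⟩)
    · exact pv_sub_self parents a hi
    · exact (pv_sub_kid_subset parents hP i c a hri hc hac).1

theorem pv_sz_rec (parents : List Int) (hP : Pre_countHighestScoreNodes parents)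
    (i : Nat) (hri : pvReach parents i) (hi : i < parents.length) :
    pvSz parents i = 1 + ((pvKids parents i).map (pvSz parents)).sum := by
  have h := (pv_sub_perm parents hP i hri hi).length_eq
  rw [pvSz, h]
  simp only [List.length_cons, List.length_flatMap]
  rw [show (fun a => (pvSub parents a).length) = pvSz parents from rfl]
  omega

theorem pv_sz_one_iff (parents : List Int) (hP : Pre_countHighestScoreNodes parents)
    (i : Nat) (hri : pvReach parents i) (hi : i < parents.length) :
    pvSz parents i = 1 ↔ pvKids parents i = [] := by
  rw [pv_sz_rec parents hP i hri hi]
  constructor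
  · intro h
    cases hk : pvKids parents i with
    | nil => rfl
    | cons c cs =>
      exfalso
      have hcL : c < parents.length := by
        have := (pv_mem_kids parents hP i c).mp (by rw [hk]; simp)
        exact this.2.1
      have h1 := pv_sz_pos parents c hcL
      rw [hk] at h
      simp at h
      omega
  · intro h
    rw [h]
    simp

-- ---------- the built children table is pvKids ----------
theorem pv_idxWrap_pa (parents : List Int) (n : Nat) (h0 : n ≠ 0) :
    pvIdxWrap parents.length (parents.getD n 0) = pvPa parents n := by
  simp [pvPa, h0]

theorem pv_build_aux (parents : List Int) (hP : Pre_countHighestScoreNodes parents)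
    (cs : List Nat) :
    ∀ (ch : List (List Nat)), ch.length = parents.length →
    (∀ c ∈ cs, 1 ≤ c ∧ c < parents.length) →
    (cs.foldl (fun ch i =>
        let j := pvIdxWrap parents.length (parents.getD i 0)
        ch.set j (ch.getD j [] ++ [i])) ch).length = parents.length ∧
    ∀ p, p < parents.length →
      (cs.foldl (fun ch i =>
          let j := pvIdxWrap parents.length (parents.getD i 0)
          ch.set j (ch.getD j [] ++ [i])) ch).getD p []
        = ch.getD p [] ++ cs.filter (fun c => pvPa parents c == p) := by
  induction cs with
  | nil => intro ch hlen _; simpa using hlen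
  | cons c cs ih =>
    intro ch hlen hmem
    have hc := hmem c (by simp)
    have hwrap : pvIdxWrap parents.length (parents.getD c 0) = pvPa parents c :=
      pv_idxWrap_pa parents c (by omega)
    have hpaL : pvPa parents c < parents.length := pv_pa_lt parents hP c hc.2
    simp only [List.foldl_cons, hwrap]
    set ch' := ch.set (pvPa parents c) (ch.getD (pvPa parents c) [] ++ [c]) with hch'
    have hlen' : ch'.length = parents.length := by simp [hch', hlen]
    obtain ⟨ihlen, ihgetD⟩ := ih ch' hlen' (fun c' h => hmem c' (by simp [h]))
    refine ⟨ihlen, ?_⟩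
    intro p hp
    rw [ihgetD p hp]
    by_cases hpc : pvPa parents c = p
    · rw [hch', hpc, pv_getD_set_self' _ _ _ _ (by omega), List.filter_cons,
        if_pos (by simpa using hpc)]
      simp
    · rw [hch', pv_getD_set_ne' _ _ _ _ _ hpc, List.filter_cons,
        if_neg (by simpa using hpc)]

theorem pv_build_getD (parents : List Int) (hP : Pre_countHighestScoreNodes parents)
    (p : Nat) (hp : p < parents.length) :
    (pvBuildChA parents).getD p [] = pvKids parents p := by
  obtain ⟨-, h⟩ := pv_build_aux parents hP (List.range' 1 (parents.length - 1))
    (List.replicate parents.length []) (by simp)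
    (by intro c hc; rw [List.mem_range'_1] at hc; omega)
  rw [pvBuildChA, h p hp, List.getD_replicate _ hp]
  rfl

theorem pv_buildB_eq (parents : List Int) : pvBuildChB parents = pvBuildChA parents := rfl

-- ---------- A's dfs computes subtree sizes on the part reachable from the root ----------
theorem pv_dfs_spec (parents : List Int) (hP : Pre_countHighestScoreNodes parents) :
    ∀ f : Nat,
      (∀ (i : Nat) (v : List Int), i < parents.length → pvReach parents i →
         parents.length + 1 ≤ pvDpt parents i + f →
         v.length = parents.length →
         (∀ j ∈ pvSub parents i, v.getD j 0 = 1) →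
         (pvDfsA (pvBuildChA parents) f i v).length = parents.length ∧
         ∀ j, (pvDfsA (pvBuildChA parents) f i v).getD j 0
             = if j ∈ pvSub parents i then (pvSz parents j : Int) else v.getD j 0)
      ∧
      (∀ (i : Nat) (cs : List Nat) (v : List Int), i < parents.length → pvReach parents i →
         parents.length ≤ pvDpt parents i + f →
         v.length = parents.length →
         (∃ pre, pvKids parents i = pre ++ cs) →
         (∀ c ∈ cs, ∀ j ∈ pvSub parents c, v.getD j 0 = 1) →
         (pvDfsKids (pvBuildChA parents) f i cs v).length = parents.length ∧
         (pvDfsKids (pvBuildChA parents) f i cs v).getD i 0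
             = v.getD i 0 + ((cs.map (pvSz parents)).sum : Int) ∧
         ∀ j, j ≠ i →
           (pvDfsKids (pvBuildChA parents) f i cs v).getD j 0
             = if ∃ c ∈ cs, j ∈ pvSub parents c then (pvSz parents j : Int) else v.getD j 0) := by
  intro f
  induction f with
  | zero =>
    constructor
    · intro i v hi hri hfuel
      have := pv_dpt_lt parents hP i hi hri
      omega
    · intro i cs v hi hri hfuel
      have := pv_dpt_lt parents hP i hi hri
      omega
  | succ f ih =>
    have hSA : ∀ (i : Nat) (v : List Int), i < parents.length → pvReach parents i →
        parents.length + 1 ≤ pvDpt parents i + (f + 1) →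
        v.length = parents.length →
        (∀ j ∈ pvSub parents i, v.getD j 0 = 1) →
        (pvDfsA (pvBuildChA parents) (f + 1) i v).length = parents.length ∧
        ∀ j, (pvDfsA (pvBuildChA parents) (f + 1) i v).getD j 0
            = if j ∈ pvSub parents i then (pvSz parents j : Int) else v.getD j 0 := by
      intro i v hi hri hfuel hlen hones
      have hkids : (pvBuildChA parents).getD i [] = pvKids parents i :=
        pv_build_getD parents hP i hi
      have hunf : pvDfsA (pvBuildChA parents) (f + 1) i v
          = pvDfsKids (pvBuildChA parents) f i (pvKids parents i) v := by
        simp only [pvDfsA]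
        rw [hkids]
      rw [hunf]
      obtain ⟨klen, kI, kJ⟩ := ih.2 i (pvKids parents i) v hi hri (by omega) hlen
        ⟨[], by simp⟩
        (fun c hc j hj => hones j (pv_sub_kid_subset parents hP i c j hri hc hj).1)
      refine ⟨klen, ?_⟩
      intro j
      by_cases hji : j = i
      · subst hji
        rw [kI, if_pos (pv_sub_self parents j hi),
          hones j (pv_sub_self parents j hi), pv_sz_rec parents hP j hri hi]
        push_cast
        ring
      · rw [kJ j hji]
        by_cases hjs : j ∈ pvSub parents i
        · rw [if_pos (pv_sub_split parents hP i j hri hi hjs hji), if_pos hjs]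
        · rw [if_neg ?_, if_neg hjs]
          rintro ⟨c, hc, hjc⟩
          exact hjs (pv_sub_kid_subset parents hP i c j hri hc hjc).1
    refine ⟨hSA, ?_⟩
    intro i cs
    induction cs with
    | nil =>
      intro v hi hri hfuel hlen hpre hones
      simp only [pvDfsKids]
      refine ⟨hlen, by simp, ?_⟩
      intro j hj
      rw [if_neg (by rintro ⟨c, hc, -⟩; simp at hc)]
    | cons c cs ihcs =>
      intro v hi hri hfuel hlen hpre hones
      obtain ⟨pre, hpre⟩ := hpre
      have hckid : c ∈ pvKids parents i := by rw [hpre]; simp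
      have hrc : pvReach parents c := pv_reach_kid parents hP i c hckid hri
      have hcL : c < parents.length := ((pv_mem_kids parents hP i c).mp hckid).2.1
      have hcnotin : c ∉ cs := by
        have hnd := pv_kids_nodup parents i
        rw [hpre] at hnd
        have := (List.nodup_append.mp hnd).2.1
        exact (List.nodup_cons.mp this).1
      obtain ⟨alen, aJ⟩ := hSA c v hcL hrc
        (by have := pv_dpt_kid parents hP i c hckid hri; omega) hlen
        (hones c (by simp))
      set v' := pvDfsA (pvBuildChA parents) (f + 1) c v with hv'
      have hvc : v'.getD c 0 = (pvSz parents c : Int) := by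
        rw [aJ c, if_pos (pv_sub_self parents c hcL)]
      have hvi : v'.getD i 0 = v.getD i 0 := by
        rw [aJ i, if_neg (pv_not_mem_kid_sub parents hP i c hri hckid)]
      set v'' := v'.set i (v'.getD i 0 + v'.getD c 0) with hv''
      have hlen'' : v''.length = parents.length := by simp [hv'', alen]
      have hunf : pvDfsKids (pvBuildChA parents) (f + 1) i (c :: cs) v
          = pvDfsKids (pvBuildChA parents) (f + 1) i cs v'' := by
        rw [hv'', hv']
        simp only [pvDfsKids]
      have hones'' : ∀ c' ∈ cs, ∀ j ∈ pvSub parents c', v''.getD j 0 = 1 := by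
        intro c' hc' j hj
        have hc'kid : c' ∈ pvKids parents i := by rw [hpre]; simp [hc']
        have hne : c ≠ c' := fun h => hcnotin (h ▸ hc')
        have hjne : j ≠ i := (pv_sub_kid_subset parents hP i c' j hri hc'kid hj).2
        rw [hv'', pv_getD_set_ne' _ _ _ _ _ (fun h => hjne h.symm), aJ j,
          if_neg (pv_sub_disjoint parents hP i c' c hri hc'kid hckid
            (fun h => hne h.symm) j hj)]
        exact hones c' (by simp [hc']) j hj
      obtain ⟨rlen, rI, rJ⟩ := ihcs v'' hi hri hfuel hlen''
        ⟨pre ++ [c], by rw [hpre]; simp⟩ hones''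
      rw [hunf]
      refine ⟨rlen, ?_, ?_⟩
      · rw [rI, hv'', pv_getD_set_self' _ _ _ _ (by omega), hvi, hvc,
          List.map_cons, List.sum_cons]
        push_cast
        ring
      · intro j hj
        rw [rJ j hj]
        have hv''j : v''.getD j 0 = v'.getD j 0 :=
          pv_getD_set_ne' _ _ _ _ _ (fun h => hj h.symm)
        by_cases h1 : ∃ c' ∈ cs, j ∈ pvSub parents c'
        · rw [if_pos h1, if_pos (by obtain ⟨c', hc', hjc'⟩ := h1; exact ⟨c', by simp [hc'], hjc'⟩)]
        · rw [if_neg h1, hv''j, aJ j]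
          by_cases h2 : j ∈ pvSub parents c
          · rw [if_pos h2, if_pos ⟨c, by simp, h2⟩]
          · rw [if_neg h2, if_neg ?_]
            rintro ⟨c', hc', hjc'⟩
            rcases List.mem_cons.mp hc' with h | h
            · exact h2 (h ▸ hjc')
            · exact h1 ⟨c', h, hjc'⟩

theorem pv_val_getD (parents : List Int) (hP : Pre_countHighestScoreNodes parents)
    (j : Nat) (hj : j < parents.length) :
    (pvDfsA (pvBuildChA parents) (parents.length + 1) 0
        (List.replicate parents.length 1)).getD j 0
      = if pvReach parents j then (pvSz parents j : Int) else 1 := by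
  have hL := pv_len_pos parents hP
  have hd0 := pv_dpt_zero parents
  have hsub0 : ∀ j', j' < parents.length → (j' ∈ pvSub parents 0 ↔ pvReach parents j') := by
    intro j' hj'
    rw [pv_mem_sub]
    constructor
    · rintro ⟨-, h⟩
      unfold pvAnc at h
      simp only [List.any_eq_true, List.mem_range, beq_iff_eq] at h
      obtain ⟨k, -, hk⟩ := h
      exact pv_reach_bound parents hP j' hj' ⟨k, hk⟩
    · intro hr
      refine ⟨hj', ?_⟩
      unfold pvAnc
      simp only [List.any_eq_true, List.mem_range, beq_iff_eq]
      exact ⟨parents.length, by omega, hr⟩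
  obtain ⟨-, hJ⟩ := (pv_dfs_spec parents hP (parents.length + 1)).1 0
    (List.replicate parents.length 1) (by omega) (pv_reach_zero parents) (by omega) (by simp)
    (by
      intro j' hj'
      have : j' < parents.length := ((pv_mem_sub parents 0 j').mp hj').1
      exact List.getD_replicate _ this)
  rw [hJ j]
  by_cases hr : pvReach parents j
  · rw [if_pos ((hsub0 j hj).mpr hr), if_pos hr]
  · rw [if_neg (fun h => hr ((hsub0 j hj).mp h)), if_neg hr]
    exact List.getD_replicate _ hj

-- ---------- B's worklist traversal ----------
-- invariant of the worklist loop
def pvInv (parents : List Int) (order : List Nat) (idx : Nat) : Prop :=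
  idx ≤ order.length ∧ order.Nodup ∧
  (∀ j ∈ order, j < parents.length ∧ pvReach parents j) ∧
  order.getD 0 0 = 0 ∧ order ≠ [] ∧
  (∀ p, p < idx → ∀ c ∈ pvKids parents (order.getD p 0), c ∈ order) ∧
  (∀ q, q < order.length → q ≠ 0 →
    ∃ p, p < q ∧ p < idx ∧ order.getD p 0 = pvPa parents (order.getD q 0))

theorem pv_getD_eq_getElem (l : List Nat) (i : Nat) (h : i < l.length) :
    l.getD i 0 = l[i] := by
  simp [List.getD_eq_getElem?_getD, List.getElem?_eq_getElem h]

theorem pv_getD_append_right (l l' : List Nat) (q : Nat) (h : l.length ≤ q) :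
    (l ++ l').getD q 0 = l'.getD (q - l.length) 0 := by
  simp [List.getD_eq_getElem?_getD, List.getElem?_append_right h]

theorem pv_mem_getD (l : List Nat) (i : Nat) (h : i < l.length) : l.getD i 0 ∈ l := by
  rw [pv_getD_eq_getElem l i h]
  exact List.getElem_mem h

theorem pv_len_le (parents : List Int) (l : List Nat) (hnd : l.Nodup)
    (hmem : ∀ j ∈ l, j < parents.length) : l.length ≤ parents.length := by
  have hsub : l ⊆ List.range parents.length := by
    intro x hx
    simpa [List.mem_range] using hmem x hx
  simpa using (List.subperm_of_subset hnd hsub).length_le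

-- a child is never its own parent's index
theorem pv_kid_ne_self (parents : List Int) (hP : Pre_countHighestScoreNodes parents)
    (n c : Nat) (hrn : pvReach parents n) (hc : c ∈ pvKids parents n) : c ≠ n := by
  intro h
  have := pv_dpt_kid parents hP n c hc hrn
  rw [h] at this
  omega

theorem pv_bfs_spec (parents : List Int) (hP : Pre_countHighestScoreNodes parents) :
    ∀ (f : Nat) (order : List Nat) (idx : Nat),
      pvInv parents order idx → parents.length ≤ idx + f →
      pvInv parents (pvBfs (pvBuildChA parents) f order idx)
        (pvBfs (pvBuildChA parents) f order idx).length ∧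
      order ⊆ pvBfs (pvBuildChA parents) f order idx := by
  intro f
  induction f with
  | zero =>
    intro order idx hinv hfuel
    have hlen : order.length ≤ parents.length :=
      pv_len_le parents order hinv.2.1 (fun j hj => (hinv.2.2.1 j hj).1)
    have : idx = order.length := by have := hinv.1; omega
    subst this
    exact ⟨by simpa [pvBfs] using hinv, by simp [pvBfs]⟩
  | succ f ih =>
    intro order idx hinv hfuel
    obtain ⟨h1, hnd, hmem, h0, hne, h4, h6⟩ := hinv
    by_cases hlt : idx < order.length
    · have hn : order.getD idx 0 ∈ order := pv_mem_getD order idx hlt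
      have hnL : order.getD idx 0 < parents.length := (hmem _ hn).1
      have hrn : pvReach parents (order.getD idx 0) := (hmem _ hn).2
      set n := order.getD idx 0 with hn0
      have hkids : (pvBuildChA parents).getD n [] = pvKids parents n :=
        pv_build_getD parents hP n hnL
      have hstep : pvBfs (pvBuildChA parents) (f + 1) order idx
          = pvBfs (pvBuildChA parents) f (order ++ pvKids parents n) (idx + 1) := by
        simp only [pvBfs]
        rw [if_pos hlt, hkids]
      set order' := order ++ pvKids parents n with ho'
      -- a child of n cannot already be in the worklist
      have hdisj : ∀ c ∈ order, c ∉ pvKids parents n := by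
        intro c hco hck
        have hc1 : 1 ≤ c := ((pv_mem_kids parents hP n c).mp hck).1
        obtain ⟨q, hq, hqe⟩ := List.mem_iff_getElem.mp hco
        have hq0 : q ≠ 0 := by
          intro h
          subst h
          rw [← pv_getD_eq_getElem order 0 hq, h0] at hqe
          omega
        obtain ⟨p, hpq, hpi, hpe⟩ := h6 q hq hq0
        rw [pv_getD_eq_getElem order q hq, hqe,
          ((pv_mem_kids parents hP n c).mp hck).2.2] at hpe
        have : p = idx := by
          have e1 : order.getD p 0 = order.getD idx 0 := hpe
          rw [pv_getD_eq_getElem order p (by omega), pv_getD_eq_getElem order idx hlt] at e1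
          exact (List.Nodup.getElem_inj_iff hnd).mp e1
        omega
      have hinv' : pvInv parents order' (idx + 1) := by
        refine ⟨by simp [ho']; omega, ?_, ?_, ?_, by simp [ho', hne], ?_, ?_⟩
        · exact List.Nodup.append hnd (pv_kids_nodup parents n) hdisj
        · intro j hj
          rcases List.mem_append.mp hj with h | h
          · exact hmem j h
          · exact ⟨((pv_mem_kids parents hP n j).mp h).2.1,
              pv_reach_kid parents hP n j h hrn⟩
        · rw [ho', pv_getD_append _ _ _ _ (by omega)]
          exact h0
        · intro p hp c hc
          by_cases hpi : p < idx
          · rw [ho', pv_getD_append _ _ _ _ (by omega)] at hc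
            exact List.mem_append_left _ (h4 p hpi c hc)
          · have : p = idx := by omega
            subst this
            rw [ho', pv_getD_append _ _ _ _ hlt] at hc
            exact List.mem_append_right _ hc
        · intro q hq hq0
          by_cases hql : q < order.length
          · obtain ⟨p, hpq, hpi, hpe⟩ := h6 q hql hq0
            refine ⟨p, hpq, by omega, ?_⟩
            rw [ho', pv_getD_append _ _ _ _ (by omega), pv_getD_append _ _ _ _ hql]
            exact hpe
          · refine ⟨idx, by omega, by omega, ?_⟩
            have hc : order'.getD q 0 ∈ pvKids parents n := by
              rw [ho', pv_getD_append_right _ _ _ (by omega)]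
              refine pv_mem_getD _ _ ?_
              have := hq
              simp [ho'] at this
              omega
            rw [ho', pv_getD_append _ _ _ _ hlt, ← hn0,
              ((pv_mem_kids parents hP n _).mp hc).2.2]
      obtain ⟨hinvr, hsub⟩ := ih order' (idx + 1) hinv' (by omega)
      rw [hstep]
      exact ⟨hinvr, fun x hx => hsub (List.mem_append_left _ hx)⟩
    · have hlen : order.length ≤ idx := by omega
      have : idx = order.length := by omega
      subst this
      have hres : pvBfs (pvBuildChA parents) (f + 1) order order.length = order := by
        simp only [pvBfs]
        rw [if_neg (by omega)]
      rw [hres]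
      exact ⟨⟨h1, hnd, hmem, h0, hne, h4, h6⟩, fun x hx => hx⟩

theorem pv_order_complete (parents : List Int) (hP : Pre_countHighestScoreNodes parents)
    (r : List Nat) (hinv : pvInv parents r r.length) :
    ∀ j, j < parents.length → pvReach parents j → j ∈ r := by
  obtain ⟨-, hnd, hmem, h0, hne, h4, h6⟩ := hinv
  have hzero : (0 : Nat) ∈ r := by
    have hlen : 0 < r.length := List.length_pos_of_ne_nil hne
    rw [← h0]
    exact pv_mem_getD r 0 hlen
  suffices H : ∀ d j, j < parents.length → pvReach parents j → pvDpt parents j = d → j ∈ r by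
    intro j hj hr'
    exact H _ j hj hr' rfl
  intro d
  induction d using Nat.strong_induction_on with
  | _ d ihd =>
    intro j hj hr' hd
    by_cases h0j : j = 0
    · subst h0j; exact hzero
    · have hstep := pv_dpt_step parents hP j hr' h0j
      have hpmem : pvPa parents j ∈ r :=
        ihd (pvDpt parents (pvPa parents j)) (by omega) (pvPa parents j)
          (pv_pa_lt parents hP j hj) (pv_reach_pa parents j hr') rfl
      obtain ⟨p, hp, hpe⟩ := List.mem_iff_getElem.mp hpmem
      refine h4 p hp j ?_
      rw [pv_getD_eq_getElem r p hp, hpe]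
      exact (pv_mem_kids parents hP _ j).mpr ⟨by omega, hj, rfl⟩

-- children occur strictly after their parent in the worklist
theorem pv_kids_after (parents : List Int) (hP : Pre_countHighestScoreNodes parents)
    (r : List Nat) (hinv : pvInv parents r r.length)
    (pre : List Nat) (n : Nat) (suf : List Nat) (hsplit : r = pre ++ n :: suf) :
    ∀ c ∈ pvKids parents n, c ∈ suf := by
  intro c hc
  subst hsplit
  obtain ⟨-, hnd, hmem, h0, hne, h4, h6⟩ := hinv
  have hnr : n ∈ pre ++ n :: suf := by simp
  have hnL : n < parents.length := (hmem n hnr).1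
  have hrn : pvReach parents n := (hmem n hnr).2
  have hp0 : pre.length < (pre ++ n :: suf).length := by
    simp only [List.length_append, List.length_cons]
    omega
  have hp0e : (pre ++ n :: suf).getD pre.length 0 = n := by
    rw [pv_getD_append_right _ _ _ (by omega)]
    simp
  have hcr : c ∈ pre ++ n :: suf := by
    refine h4 pre.length hp0 c ?_
    rw [hp0e]
    exact hc
  have hc1 : 1 ≤ c := ((pv_mem_kids parents hP n c).mp hc).1
  have hcpa : pvPa parents c = n := ((pv_mem_kids parents hP n c).mp hc).2.2
  obtain ⟨q, hq, hqe⟩ := List.mem_iff_getElem.mp hcr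
  have hq0 : q ≠ 0 := by
    intro h
    subst h
    rw [← pv_getD_eq_getElem (pre ++ n :: suf) 0 hq, h0] at hqe
    omega
  obtain ⟨p, hpq, -, hpe⟩ := h6 q hq hq0
  have hpidx : p = pre.length := by
    rw [pv_getD_eq_getElem (pre ++ n :: suf) q hq, hqe, hcpa] at hpe
    have e1 : (pre ++ n :: suf).getD p 0 = (pre ++ n :: suf).getD pre.length 0 := by
      rw [hpe, hp0e]
    rw [pv_getD_eq_getElem (pre ++ n :: suf) p (by omega),
      pv_getD_eq_getElem (pre ++ n :: suf) pre.length hp0] at e1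
    exact (List.Nodup.getElem_inj_iff hnd).mp e1
  -- c sits at position q > pre.length, hence in suf
  have hq' : pre.length + 1 ≤ q := by omega
  have hcm : c ∈ n :: suf := by
    rw [← hqe, List.getElem_append_right (by omega)]
    exact List.getElem_mem _
  rcases List.mem_cons.mp hcm with h | h
  · exact absurd h (pv_kid_ne_self parents hP n c hrn hc)
  · exact h

theorem pv_inner_fold (parents : List Int) (n : Nat) :
    ∀ (cs : List Nat) (sz : List Int), n < sz.length →
      (∀ c ∈ cs, c ≠ n ∧ c < sz.length) →
      (cs.foldl (fun sz c => sz.set n (sz.getD n 0 + sz.getD c 0)) sz).length = sz.length ∧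
      (cs.foldl (fun sz c => sz.set n (sz.getD n 0 + sz.getD c 0)) sz).getD n 0
        = sz.getD n 0 + (cs.map (fun c => sz.getD c 0)).sum ∧
      ∀ j, j ≠ n →
        (cs.foldl (fun sz c => sz.set n (sz.getD n 0 + sz.getD c 0)) sz).getD j 0
          = sz.getD j 0 := by
  intro cs
  induction cs with
  | nil => intro sz hn _; simpa using ⟨rfl, by ring⟩
  | cons c cs ih =>
    intro sz hn hcs
    have hc := hcs c (by simp)
    simp only [List.foldl_cons]
    set sz' := sz.set n (sz.getD n 0 + sz.getD c 0) with hsz'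
    have hlen' : sz'.length = sz.length := by simp [hsz']
    obtain ⟨ilen, iN, iJ⟩ := ih sz' (by omega) (fun c' h => by
      have := hcs c' (by simp [h]); omega)
    have hmapc : cs.map (fun c' => sz'.getD c' 0) = cs.map (fun c' => sz.getD c' 0) := by
      refine List.map_congr_left ?_
      intro c' hc'
      exact pv_getD_set_ne' _ _ _ _ _ (fun h => (hcs c' (by simp [hc'])).1 h.symm)
    refine ⟨by omega, ?_, ?_⟩
    · rw [iN, hsz', pv_getD_set_self' _ _ _ _ hn, hmapc, List.map_cons, List.sum_cons]
      ring
    · intro j hj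
      rw [iJ j hj, hsz', pv_getD_set_ne' _ _ _ _ _ (fun h => hj h.symm)]

theorem pv_sizes_fold (parents : List Int) (hP : Pre_countHighestScoreNodes parents)
    (r : List Nat) (hinv : pvInv parents r r.length) :
    ∀ (l done : List Nat) (sz : List Int), r = l.reverse ++ done →
      sz.length = parents.length →
      (∀ j, j < parents.length →
        sz.getD j 0 = if j ∈ done then (pvSz parents j : Int) else 1) →
      (l.foldl (fun sz n => ((pvBuildChA parents).getD n []).foldl
          (fun sz c => sz.set n (sz.getD n 0 + sz.getD c 0)) sz) sz).length = parents.length ∧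
      ∀ j, j < parents.length →
        (l.foldl (fun sz n => ((pvBuildChA parents).getD n []).foldl
            (fun sz c => sz.set n (sz.getD n 0 + sz.getD c 0)) sz) sz).getD j 0
          = if j ∈ r then (pvSz parents j : Int) else 1 := by
  intro l
  induction l with
  | nil =>
    intro done sz hsplit hlen hentries
    refine ⟨by simpa using hlen, ?_⟩
    intro j hj
    rw [List.foldl_nil, hentries j hj, hsplit]
    simp
  | cons n l' ih =>
    intro done sz hsplit hlen hentries
    have hsplit' : r = l'.reverse ++ (n :: done) := by
      rw [hsplit]
      simp
    have hnr : n ∈ r := by rw [hsplit']; simp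
    have hnL : n < parents.length := (hinv.2.2.1 n hnr).1
    have hrn : pvReach parents n := (hinv.2.2.1 n hnr).2
    have hnotin : n ∉ done := by
      have hnd := hinv.2.1
      rw [hsplit'] at hnd
      exact (List.nodup_cons.mp (List.nodup_append.mp hnd).2.1).1
    have hkids : (pvBuildChA parents).getD n [] = pvKids parents n :=
      pv_build_getD parents hP n hnL
    have hkdone : ∀ c ∈ pvKids parents n, c ∈ done :=
      pv_kids_after parents hP r hinv l'.reverse n done hsplit'
    simp only [List.foldl_cons, hkids]
    obtain ⟨ilen, iN, iJ⟩ := pv_inner_fold parents n (pvKids parents n) sz (by omega)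
      (fun c hc => ⟨pv_kid_ne_self parents hP n c hrn hc,
        by rw [hlen]; exact ((pv_mem_kids parents hP n c).mp hc).2.1⟩)
    set sz' := (pvKids parents n).foldl
      (fun sz c => sz.set n (sz.getD n 0 + sz.getD c 0)) sz with hsz'
    have hentries' : ∀ j, j < parents.length →
        sz'.getD j 0 = if j ∈ n :: done then (pvSz parents j : Int) else 1 := by
      intro j hj
      by_cases hjn : j = n
      · subst hjn
        rw [iN, hentries j hj, if_neg hnotin, if_pos (by simp)]
        have hmap : (pvKids parents j).map (fun c => sz.getD c 0)
            = (pvKids parents j).map (fun c => (pvSz parents c : Int)) := by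
          refine List.map_congr_left ?_
          intro c hc
          rw [hentries c ((pv_mem_kids parents hP j c).mp hc).2.1, if_pos (hkdone c hc)]
        rw [hmap, pv_sz_rec parents hP j hrn hj]
        push_cast
        rw [List.map_map]
        rfl
      · rw [iJ j hjn, hentries j hj]
        by_cases hjd : j ∈ done
        · rw [if_pos hjd, if_pos (by simp [hjd])]
        · rw [if_neg hjd, if_neg (by simp [hjn, hjd])]
    exact ih (n :: done) sz' hsplit' (by omega) hentries'

theorem pv_size_getD (parents : List Int) (hP : Pre_countHighestScoreNodes parents)
    (j : Nat) (hj : j < parents.length) :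
    (pvSizesB parents (pvBuildChA parents)
        (pvBfs (pvBuildChA parents) parents.length [0] 0)).getD j 0
      = if pvReach parents j then (pvSz parents j : Int) else 1 := by
  have hL := pv_len_pos parents hP
  have hinv0 : pvInv parents [0] 0 := by
    refine ⟨by simp, by simp, ?_, by simp, by simp, ?_, ?_⟩
    · intro j hj
      simp at hj
      subst hj
      exact ⟨by omega, pv_reach_zero parents⟩
    · intro p hp
      omega
    · intro q hq hq0
      simp at hq
      omega
  obtain ⟨hinv, -⟩ := pv_bfs_spec parents hP parents.length [0] 0 hinv0 (by omega)
  set r := pvBfs (pvBuildChA parents) parents.length [0] 0 with hr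
  obtain ⟨-, hgetD⟩ := pv_sizes_fold parents hP r hinv r.reverse []
    (List.replicate parents.length 1) (by simp) (by simp)
    (by
      intro j' hj'
      rw [if_neg (by simp : ¬ j' ∈ ([] : List Nat)), List.getD_replicate _ hj'])
  rw [pvSizesB, hgetD j hj]
  by_cases hrj : pvReach parents j
  · rw [if_pos hrj, if_pos (pv_order_complete parents hP r hinv j hj hrj)]
  · rw [if_neg hrj, if_neg (fun h => hrj (hinv.2.2.1 j h).2)]

-- ---------- final assembly ----------
theorem pv_foldl_mul (g : Nat → Int) (l : List Nat) :
    ∀ a : Int, l.foldl (fun s c => s * g c) a = a * l.foldl (fun s c => s * g c) 1 := by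
  induction l with
  | nil => intro a; simp
  | cons c cs ih =>
    intro a
    simp only [List.foldl_cons]
    rw [ih (a * g c), ih (1 * g c)]
    ring

theorem pv_foldl_one (g : Nat → Int) (l : List Nat) (h : ∀ c ∈ l, g c = 1) :
    ∀ a : Int, l.foldl (fun s c => s * g c) a = a := by
  induction l with
  | nil => intro a; simp
  | cons c cs ih =>
    intro a
    simp only [List.foldl_cons]
    rw [h c (by simp), mul_one]
    exact ih (fun c' hc' => h c' (by simp [hc'])) a

-- ===== VERDICT (by name: the statement is the Claim_ definition above) =====
theorem countHighestScoreNodes_spec : Claim_equal_countHighestScoreNodes := by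
  intro parents hD hP
  unfold Spec_countHighestScoreNodes
  have hL := pv_len_pos parents hP
  by_cases hL1 : parents.length = 1
  · obtain ⟨x, hx⟩ := List.length_eq_one_iff.mp hL1
    subst hx
    simp [countHighestScoreNodes, countHighestScoreNodes_alt, pvBuildChA, pvBuildChB,
      pvDfsA, pvDfsKids, pvBfs, pvSizesB, List.range_succ]
  · have hL2 : 2 ≤ parents.length := by omega
    have hval := pv_val_getD parents hP
    have hsiz := pv_size_getD parents hP
    simp only [countHighestScoreNodes, countHighestScoreNodes_alt, pv_buildB_eq]
    refine congrArg Prod.snd (PySem.List.foldl_congr_mem _ _ _ _ ?_)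
    intro acc x hx
    have hxL : x < parents.length := by simpa using hx
    have hch := pv_build_getD parents hP x hxL
    rw [hch, hval x hxL, hsiz x hxL]
    have hkmem : ∀ c ∈ pvKids parents x, c < parents.length := by
      intro c hc
      exact ((pv_mem_kids parents hP x c).mp hc).2.1
    -- the two inner folds compute the same product of the children's values
    have hsame : ∀ c ∈ pvKids parents x,
        (pvDfsA (pvBuildChA parents) (parents.length + 1) 0
            (List.replicate parents.length 1)).getD c 0
          = (pvSizesB parents (pvBuildChA parents)
              (pvBfs (pvBuildChA parents) parents.length [0] 0)).getD c 0 := by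
      intro c hc
      rw [hval c (hkmem c hc), hsiz c (hkmem c hc)]
    have hfoldAB : ∀ a : Int,
        (pvKids parents x).foldl (fun s c => s *
            (pvDfsA (pvBuildChA parents) (parents.length + 1) 0
              (List.replicate parents.length 1)).getD c 0) a =
        (pvKids parents x).foldl (fun s c => s *
            (pvSizesB parents (pvBuildChA parents)
              (pvBfs (pvBuildChA parents) parents.length [0] 0)).getD c 0) a :=
      fun a => PySem.List.foldl_congr_mem _ _ _ a (fun acc c hc => by rw [hsame c hc])
    have hs :
        (if (if pvReach parents x then (pvSz parents x : Int) else 1) = 1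
          then (parents.length : Int) - 1
          else (pvKids parents x).foldl (fun s c => s *
              (pvDfsA (pvBuildChA parents) (parents.length + 1) 0
                (List.replicate parents.length 1)).getD c 0)
            (if (parents.length : Int) - (if pvReach parents x then (pvSz parents x : Int) else 1) = 0
             then 1
             else (parents.length : Int) - (if pvReach parents x then (pvSz parents x : Int) else 1)))
        = (if (parents.length : Int) - (if pvReach parents x then (pvSz parents x : Int) else 1) > 0
            then ((pvKids parents x).foldl (fun s c => s *
                (pvSizesB parents (pvBuildChA parents)
                  (pvBfs (pvBuildChA parents) parents.length [0] 0)).getD c 0) 1)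
              * ((parents.length : Int) - (if pvReach parents x then (pvSz parents x : Int) else 1))
            else (pvKids parents x).foldl (fun s c => s *
                (pvSizesB parents (pvBuildChA parents)
                  (pvBfs (pvBuildChA parents) parents.length [0] 0)).getD c 0) 1) := by
      by_cases hr : pvReach parents x
      · rw [if_pos hr]
        have hle := pv_sz_le parents x
        by_cases h1 : pvSz parents x = 1
        · rw [if_pos (by exact_mod_cast congrArg (Nat.cast : Nat → Int) h1),
            (pv_sz_one_iff parents hP x hr hxL).mp h1, h1,
            if_pos (by push_cast; omega)]
          simp
        · rw [if_neg (fun h => h1 (by exact_mod_cast h)), hfoldAB,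
            pv_foldl_mul _ _ (if (parents.length : Int) - (pvSz parents x : Int) = 0 then 1
              else (parents.length : Int) - (pvSz parents x : Int))]
          by_cases h2 : pvSz parents x = parents.length
          · rw [if_pos (by rw [h2]; ring), if_neg (by rw [h2]; simp)]
            ring
          · have hlt : pvSz parents x < parents.length := by omega
            rw [if_neg (by push_cast; omega), if_pos (by push_cast; omega)]
            ring
      · -- x is not reachable from the root: A scores it as a leaf; B's product of its
        -- children's values is 1 since they are unreachable too
        rw [if_neg hr, if_pos rfl, if_pos (by push_cast; omega)]
        rw [pv_foldl_one _ _ ?_ 1]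
        · ring
        · intro c hc
          rw [← hsame c hc, hval c (hkmem c hc),
            if_neg (pv_unreach_kid parents hP x c hc hr)]
    rw [hs]
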